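-- pv_equiv track=rewrite | github.com/knutnergaard/smufolib | bin/generateMetadata.py | _getSetsTemplate
-- ===== SOURCE A (Python) =====
-- from typing import Any
--
-- JsonDict = dict[str, Any]
--
-- SetsTemplate = dict[str, dict[str, str]]
--
-- def _getSetsTemplate(fontData: JsonDict) -> SetsTemplate:
--     # Extract sets template from bravura_metadata.json.
--     sets: dict[str, dict[str, str]] = {}
--
--     for key, values in fontData["sets"].items():
--         sets[key] = {}
--         for subKey, value in values.items():
--             if subKey not in ("description", "type"):
--                 continue
--             sets[key][subKey] = value
--     return sets
-- ===== SOURCE B (Python) =====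
-- def _getSetsTemplate(fontData):
--     # Probe the two wanted keys directly instead of scanning every subkey and filtering.
--     sets = {}
--     for key, values in fontData["sets"].items():
--         entry = {}
--         for subKey in ("description", "type"):
--             if subKey in values:
--                 entry[subKey] = values[subKey]
--         sets[key] = entry
--     return sets
-- ===== Notes on version B (the rewrite author's own statement) =====
-- stated objective: alternative
-- what changed: B probes the two fixed wanted keys ('description','type') in each set's dict instead of A's scan of every subkey with a filter; as Python dicts the results are always equal, only insertion order of the two subkeys can differ.
-- outside the precondition, e.g. on _getSetsTemplate({}): A raises KeyError, B raises KeyError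
import Mathlib
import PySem

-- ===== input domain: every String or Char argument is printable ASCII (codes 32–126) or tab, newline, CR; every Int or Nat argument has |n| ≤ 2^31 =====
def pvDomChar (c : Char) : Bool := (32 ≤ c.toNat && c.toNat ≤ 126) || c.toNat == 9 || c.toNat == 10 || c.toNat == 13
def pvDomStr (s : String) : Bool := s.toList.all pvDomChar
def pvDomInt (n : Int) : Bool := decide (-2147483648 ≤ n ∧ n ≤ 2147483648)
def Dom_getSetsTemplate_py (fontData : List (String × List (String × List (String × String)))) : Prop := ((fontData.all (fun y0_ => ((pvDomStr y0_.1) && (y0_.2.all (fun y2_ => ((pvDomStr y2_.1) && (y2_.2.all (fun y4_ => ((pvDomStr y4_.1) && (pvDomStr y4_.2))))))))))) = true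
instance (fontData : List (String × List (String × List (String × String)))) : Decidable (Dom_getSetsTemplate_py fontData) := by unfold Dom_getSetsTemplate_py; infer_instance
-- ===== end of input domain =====

-- B probes the two wanted subkeys directly instead of scanning and filtering; equal output, Pre_ excludes the missing-"sets" KeyError and the subkey-order corner where only dict insertion order differs.


-- ===== PORT A =====
-- A: for each (key, values) in fontData["sets"], sets[key] = {}; then scan values, skipping
-- subkeys other than "description"/"type", assigning the kept ones into sets[key].
def getSetsTemplate_py (fontData : List (String × List (String × List (String × String)))) : List (String × List (String × String)) :=
  match (PySem.Dict.mk fontData).get? "sets" with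
  | none => []  -- Python raises KeyError here; excluded by Pre_
  | some s =>
    ((s.foldl (fun (sets : PySem.Dict String (PySem.Dict String String)) kv =>
        let sets1 := sets.insert kv.1 PySem.Dict.empty
        kv.2.foldl (fun sets sv =>
          if ¬(sv.1 == "description" || sv.1 == "type") then sets  -- continue
          else sets.insert kv.1 ((sets.getD kv.1 PySem.Dict.empty).insert sv.1 sv.2)) sets1)
      PySem.Dict.empty).items).map (fun p => (p.1, p.2.items))

-- ===== PORT B =====
-- B: for each (key, values), probe the fixed tuple ("description", "type") in values.
def getSetsTemplate_py_alt (fontData : List (String × List (String × List (String × String)))) : List (String × List (String × String)) :=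
  match (PySem.Dict.mk fontData).get? "sets" with
  | none => []  -- Python raises KeyError here; excluded by Pre_
  | some s =>
    ((s.foldl (fun (sets : PySem.Dict String (PySem.Dict String String)) kv =>
        let entry := (["description", "type"]).foldl (fun (entry : PySem.Dict String String) sk =>
          match (PySem.Dict.mk kv.2).get? sk with
          | some v => entry.insert sk v
          | none => entry) PySem.Dict.empty
        sets.insert kv.1 entry)
      PySem.Dict.empty).items).map (fun p => (p.1, p.2.items))

-- ===== PRECONDITION & SPEC =====
-- the wanted subkeys of one values dict, in encounter order
def pvWantedKeys (vs : List (String × String)) : List String :=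
  (vs.map Prod.fst).filter (fun k => k == "description" || k == "type")
-- Pre_ excludes (a) inputs without a "sets" key, where A raises KeyError, and (b) values dicts whose
-- wanted subkeys are duplicated or have "type" before "description": there A's and B's outputs are the
-- same Python dict and only the accidental insertion order differs (duplicates are unreachable from Python dicts).
def Pre_getSetsTemplate_py (fontData : List (String × List (String × List (String × String)))) : Prop :=
  ((PySem.Dict.mk fontData).get? "sets").isSome = true ∧
  ∀ p ∈ ((PySem.Dict.mk fontData).get? "sets").getD [],
    pvWantedKeys p.2 ∈ [([] : List String), ["description"], ["type"], ["description", "type"]]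
instance (fontData : List (String × List (String × List (String × String)))) : Decidable (Pre_getSetsTemplate_py fontData) := by unfold Pre_getSetsTemplate_py; infer_instance
def pvWitness_getSetsTemplate_py : (List (String × List (String × List (String × String)))) :=
  [("sets", [("setA", [("description", "A set"), ("type", "cup"), ("glyphs", "x")]), ("setB", [])])]
def Spec_getSetsTemplate_py (fontData : List (String × List (String × List (String × String)))) (out : List (String × List (String × String))) : Prop := out = getSetsTemplate_py_alt fontData
instance (fontData : List (String × List (String × List (String × String)))) (out : List (String × List (String × String))) : Decidable (Spec_getSetsTemplate_py fontData out) := by unfold Spec_getSetsTemplate_py; infer_instance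

-- ===== CLAIM (what is proved, stated in full; the proofs are below) =====
def Claim_equal_getSetsTemplate_py : Prop := ∀ (fontData : List (String × List (String × List (String × String)))), Dom_getSetsTemplate_py fontData → Pre_getSetsTemplate_py fontData → Spec_getSetsTemplate_py fontData (getSetsTemplate_py fontData)

-- ===== LEMMAS AND PROOFS =====

-- A's inner loop, pulled out of the sets dict
def pvInnerA (vs : List (String × String)) : PySem.Dict String String :=
  vs.foldl (fun d sv => if ¬(sv.1 == "description" || sv.1 == "type") then d else d.insert sv.1 sv.2) PySem.Dict.empty

-- B's inner loop
def pvInnerB (vs : List (String × String)) : PySem.Dict String String :=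
  (["description", "type"]).foldl (fun (entry : PySem.Dict String String) sk =>
    match (PySem.Dict.mk vs).get? sk with
    | some v => entry.insert sk v
    | none => entry) PySem.Dict.empty

lemma pvA_body_eq (vs : List (String × String)) (key : String)
    (sets : PySem.Dict String (PySem.Dict String String)) (d : PySem.Dict String String) :
    vs.foldl (fun sets sv =>
        if ¬(sv.1 == "description" || sv.1 == "type") then sets
        else sets.insert key ((sets.getD key PySem.Dict.empty).insert sv.1 sv.2)) (sets.insert key d)
      = sets.insert key (vs.foldl (fun d sv => if ¬(sv.1 == "description" || sv.1 == "type") then d else d.insert sv.1 sv.2) d) := by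
  induction vs generalizing d with
  | nil => rfl
  | cons sv vs ih =>
    by_cases h : (sv.1 == "description" || sv.1 == "type") = true
    · rw [List.foldl_cons, List.foldl_cons, if_neg (by simp [h]), if_neg (by simp [h]),
        PySem.Dict.getD_insert_self, PySem.Dict.insert_insert_self, ih]
    · rw [List.foldl_cons, List.foldl_cons, if_pos (by simp [h]), if_pos (by simp [h]), ih]

lemma pv_get?_mk_eq_find? (vs : List (String × String)) (k : String) :
    (PySem.Dict.mk vs).get? k = (vs.find? (fun p => p.1 == k)).map Prod.snd := by
  induction vs with
  | nil => rfl
  | cons p vs ih =>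
    rw [PySem.Dict.get?_mk_cons]
    by_cases h : (p.1 == k) = true
    · simp [h]
    · simp only [Bool.not_eq_true] at h
      simp [h, ih]

lemma pv_inner_eq (vs : List (String × String))
    (h : pvWantedKeys vs ∈ [([] : List String), ["description"], ["type"], ["description", "type"]]) :
    pvInnerA vs = pvInnerB vs := by
  have hA : pvInnerA vs
      = (vs.filter (fun sv => sv.1 == "description" || sv.1 == "type")).foldl
          (fun (d : PySem.Dict String String) sv => d.insert sv.1 sv.2) PySem.Dict.empty := by
    unfold pvInnerA
    rw [List.foldl_filter]
    simp only [ite_not]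
  have hW : pvWantedKeys vs
      = (vs.filter (fun sv => sv.1 == "description" || sv.1 == "type")).map Prod.fst := by
    unfold pvWantedKeys
    rw [List.filter_map]
    rfl
  have hfind : ∀ k : String, (k == "description" || k == "type") = true →
      vs.find? (fun sv => sv.1 == k)
        = (vs.filter (fun sv => sv.1 == "description" || sv.1 == "type")).find? (fun sv => sv.1 == k) := by
    intro k hk
    rw [List.find?_filter]
    congr 1
    funext a
    by_cases hke : a.1 = k
    · subst hke; simp [hk]
    · simp [hke]
  have hB : pvInnerB vs
      = (["description", "type"] : List String).foldl (fun (entry : PySem.Dict String String) sk =>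
          match ((vs.filter (fun sv => sv.1 == "description" || sv.1 == "type")).find? (fun sv => sv.1 == sk)).map Prod.snd with
          | some v => entry.insert sk v
          | none => entry) PySem.Dict.empty := by
    unfold pvInnerB
    simp only [List.foldl_cons, List.foldl_nil, pv_get?_mk_eq_find?,
      hfind "description" (by decide), hfind "type" (by decide)]
  rw [hA, hB]
  rw [hW] at h
  rcases hF : vs.filter (fun sv => sv.1 == "description" || sv.1 == "type")
    with _ | ⟨⟨a1, a2⟩, _ | ⟨⟨b1, b2⟩, rest⟩⟩ <;> rw [hF] at h ⊢
  · rfl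
  · have ha : a1 = "description" ∨ a1 = "type" := by
      simp only [List.map_cons, List.map_nil, List.mem_cons, List.not_mem_nil, or_false] at h
      rcases h with h | h | h | h <;> simp_all
    rcases ha with ha | ha <;> subst ha <;> simp [List.find?]
  · have hab : b1 = "type" ∧ (a1 = "description" ∧ rest.map Prod.fst = []) := by
      simp only [List.map_cons, List.mem_cons, List.not_mem_nil, or_false] at h
      rcases h with h | h | h | h <;> simp_all
    obtain ⟨hb, ha, hrest⟩ := hab
    obtain hrest' : rest = [] := by simpa using hrest
    subst hb ha hrest'
    simp [List.find?]

lemma pv_outer_eq (s : List (String × List (String × String)))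
    (h : ∀ p ∈ s, pvWantedKeys p.2 ∈ [([] : List String), ["description"], ["type"], ["description", "type"]]) :
    s.foldl (fun (sets : PySem.Dict String (PySem.Dict String String)) kv =>
        kv.2.foldl (fun sets sv =>
          if ¬(sv.1 == "description" || sv.1 == "type") then sets
          else sets.insert kv.1 ((sets.getD kv.1 PySem.Dict.empty).insert sv.1 sv.2))
          (sets.insert kv.1 PySem.Dict.empty))
      PySem.Dict.empty
    = s.foldl (fun (sets : PySem.Dict String (PySem.Dict String String)) kv =>
        sets.insert kv.1 ((["description", "type"]).foldl (fun (entry : PySem.Dict String String) sk =>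
          match (PySem.Dict.mk kv.2).get? sk with
          | some v => entry.insert sk v
          | none => entry) PySem.Dict.empty))
      PySem.Dict.empty := by
  apply PySem.List.foldl_congr_mem
  intro sets kv hkv
  rw [pvA_body_eq]
  have := pv_inner_eq kv.2 (h kv hkv)
  simp only [pvInnerA, pvInnerB] at this
  rw [this]

-- ===== VERDICT (by name: the statement is the Claim_ definition above) =====
theorem getSetsTemplate_py_spec : Claim_equal_getSetsTemplate_py := by
  intro fontData _ hpre
  obtain ⟨hsome, hall⟩ := hpre
  unfold Spec_getSetsTemplate_py getSetsTemplate_py getSetsTemplate_py_alt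
  cases hs : (PySem.Dict.mk fontData).get? "sets" with
  | none => simp [hs] at hsome
  | some s =>
    exact congrArg (fun (d : PySem.Dict String (PySem.Dict String String)) => d.items.map (fun p => (p.1, p.2.items)))
      (pv_outer_eq s (by intro p hp; exact hall p (by simp [hs]; exact hp)))
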